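-- pv_equiv track=rewrite | github.com/rin-gil/youtube-music-download-bot | tgbot/services/youtube.py | _remove_unwanted_chars
-- ===== SOURCE A (Python) =====
-- def _remove_unwanted_chars(string: str) -> str:
--     """Removes everything from the string except letters, numbers, spaces, hyphens, and underscores"""
--     processed_string: str = ""
--     for char in string[:100]:
--         if char.isalnum() or char == "-" or char == "_":
--             processed_string += char
--         elif char.isspace() and (not processed_string or not processed_string[-1].isspace()):
--             processed_string += char
--     return processed_string
-- ===== SOURCE B (Python) =====
-- def _remove_unwanted_chars(string: str) -> str:
--     """Removes everything from the string except letters, numbers, spaces, hyphens, and underscores"""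
--     filtered = [c for c in string[:100]
--                 if c.isalnum() or c == "-" or c == "_" or c.isspace()]
--     out = []
--     prev_space = False
--     for c in filtered:
--         if c.isspace():
--             if not prev_space:
--                 out.append(c)
--             prev_space = True
--         else:
--             out.append(c)
--             prev_space = False
--     return "".join(out)
-- ===== Notes on version B (the rewrite author's own statement) =====
-- stated objective: alternative
-- what changed: Replaces A's single loop that branches on the growing result string's last character with two independent passes: a filter keeping every allowed character (including all whitespace), then a whitespace-collapse scan driven by a previous-was-space boolean flag instead of inspecting the accumulated output.
import Mathlib
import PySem

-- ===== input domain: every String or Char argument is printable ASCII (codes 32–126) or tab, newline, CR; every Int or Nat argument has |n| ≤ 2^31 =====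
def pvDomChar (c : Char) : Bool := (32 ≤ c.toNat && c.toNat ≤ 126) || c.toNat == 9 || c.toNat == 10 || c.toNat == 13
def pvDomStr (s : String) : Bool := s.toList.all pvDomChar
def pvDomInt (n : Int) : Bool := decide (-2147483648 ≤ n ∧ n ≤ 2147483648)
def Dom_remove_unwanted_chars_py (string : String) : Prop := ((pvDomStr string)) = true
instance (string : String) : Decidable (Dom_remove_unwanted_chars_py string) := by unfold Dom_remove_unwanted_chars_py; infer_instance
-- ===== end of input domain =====

-- B replaces A's single loop (which inspects the last character of the growing result) by a
-- filter pass plus a whitespace-collapse pass with a boolean flag; same result, different decomposition.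

-- ===== PORT A =====
-- processed_string[-1].isspace() of A, on the accumulator (guarded by non-emptiness in A's code)
def pvLastIsSpace (acc : List Char) : Bool :=
  ((PySem.List.pyGet? acc (-1)).map PySem.Chars.isspace).getD false

def pvStepA (acc : List Char) (c : Char) : List Char :=
  if PySem.Chars.isalnum c || c == '-' || c == '_' then acc ++ [c]
  else if PySem.Chars.isspace c && (acc.isEmpty || !pvLastIsSpace acc) then acc ++ [c]
  else acc

def remove_unwanted_chars_py (string : String) : String :=
  String.ofList (((PySem.Str.slice string none (some 100)).toList).foldl pvStepA [])

-- ===== PORT B =====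
def pvAllowed (c : Char) : Bool :=
  PySem.Chars.isalnum c || c == '-' || c == '_' || PySem.Chars.isspace c

def pvStepB (st : List Char × Bool) (c : Char) : List Char × Bool :=
  if PySem.Chars.isspace c then
    (if st.2 then st else (st.1 ++ [c], true))
  else (st.1 ++ [c], false)

def remove_unwanted_chars_py_alt (string : String) : String :=
  String.ofList ((((PySem.Str.slice string none (some 100)).toList).filter pvAllowed).foldl
    pvStepB ([], false)).1

-- ===== PRECONDITION & SPEC =====
def Spec_remove_unwanted_chars_py (string : String) (out : String) : Prop := out = remove_unwanted_chars_py_alt string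
instance (string : String) (out : String) : Decidable (Spec_remove_unwanted_chars_py string out) := by unfold Spec_remove_unwanted_chars_py; infer_instance

-- ===== CLAIM (what is proved, stated in full; the proofs are below) =====
def Claim_equal_remove_unwanted_chars_py : Prop := ∀ (string : String), Dom_remove_unwanted_chars_py string → Spec_remove_unwanted_chars_py string (remove_unwanted_chars_py string)

-- ===== LEMMAS AND PROOFS =====

theorem pv_alnum_not_space (c : Char) (h : PySem.Chars.isalnum c = true) :
    PySem.Chars.isspace c = false := by
  simp only [PySem.Chars.isalnum, PySem.Chars.isalpha, PySem.Chars.isdigit, PySem.Chars.isupper,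
    PySem.Chars.islower, PySem.Chars.isspace, Bool.or_eq_true, Bool.and_eq_true, decide_eq_true_eq,
    Char.le_def, Bool.or_eq_false_iff, Bool.and_eq_false_iff, decide_eq_false_iff_not, not_le,
    Char.toNat, UInt32.le_iff_toNat_le] at *
  have hA : 'A'.val.toNat = 65 := rfl
  have hZ : 'Z'.val.toNat = 90 := rfl
  have ha : 'a'.val.toNat = 97 := rfl
  have hz : 'z'.val.toNat = 122 := rfl
  have h0 : '0'.val.toNat = 48 := rfl
  have h9 : '9'.val.toNat = 57 := rfl
  omega

theorem pv_first_branch_not_space (c : Char)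
    (h : (PySem.Chars.isalnum c || c == '-' || c == '_') = true) :
    PySem.Chars.isspace c = false := by
  simp only [Bool.or_eq_true, beq_iff_eq] at h
  rcases h with (h | h) | h
  · exact pv_alnum_not_space c h
  · subst h; decide
  · subst h; decide

theorem pvLastIsSpace_append (acc : List Char) (c : Char) :
    pvLastIsSpace (acc ++ [c]) = PySem.Chars.isspace c := by
  simp [pvLastIsSpace, PySem.List.pyGet?, PySem.List.pyIdx?]

theorem pvLastIsSpace_ne_nil (acc : List Char) (h : pvLastIsSpace acc = true) :
    acc.isEmpty = false := by
  cases acc with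
  | nil => simp [pvLastIsSpace, PySem.List.pyGet?, PySem.List.pyIdx?] at h
  | cons a as => rfl

theorem pv_key (cs : List Char) : ∀ acc : List Char,
    cs.foldl pvStepA acc =
      ((cs.filter pvAllowed).foldl pvStepB (acc, pvLastIsSpace acc)).1 := by
  induction cs with
  | nil => intro acc; rfl
  | cons c cs ih =>
    intro acc
    by_cases h1 : (PySem.Chars.isalnum c || c == '-' || c == '_') = true
    · have hs : PySem.Chars.isspace c = false := pv_first_branch_not_space c h1
      have hall : pvAllowed c = true := by
        simp only [pvAllowed, Bool.or_assoc] at *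
        simp [← Bool.or_assoc, h1]
      simp only [List.foldl_cons, List.filter_cons, hall, if_pos, pvStepA, h1]
      rw [ih (acc ++ [c])]
      simp [pvStepB, hs, pvLastIsSpace_append]
    · have h1' : (PySem.Chars.isalnum c || c == '-' || c == '_') = false :=
        Bool.not_eq_true _ ▸ (by simpa using h1)
      by_cases h2 : PySem.Chars.isspace c = true
      · have hall : pvAllowed c = true := by simp [pvAllowed, h2]
        simp only [List.foldl_cons, List.filter_cons, hall, if_pos]
        cases hflag : pvLastIsSpace acc with
        | true =>
          have hne := pvLastIsSpace_ne_nil acc hflag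
          simp only [pvStepA, h1', Bool.false_eq_true, h2, hne, hflag,
            Bool.not_true, Bool.or_false, Bool.and_false, if_neg, Bool.false_eq_true,
            not_false_eq_true]
          rw [ih acc]
          simp [pvStepB, h2, hflag]
        | false =>
          simp only [pvStepA, h1', Bool.false_eq_true, if_false, h2, hflag,
            Bool.not_false, Bool.or_true, Bool.and_true, if_pos]
          rw [ih (acc ++ [c])]
          simp [pvStepB, h2, pvLastIsSpace_append]
      · have h2' : PySem.Chars.isspace c = false := by simpa using h2
        have hall : pvAllowed c = false := by
          simp [pvAllowed, h2']
          simpa using h1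
        simp only [List.foldl_cons, List.filter_cons, hall, Bool.false_eq_true, if_false]
        have : pvStepA acc c = acc := by simp [pvStepA, h1', h2']
        rw [this, ih acc]

-- ===== VERDICT (by name: the statement is the Claim_ definition above) =====
theorem remove_unwanted_chars_py_spec : Claim_equal_remove_unwanted_chars_py := by
  intro s _
  unfold Spec_remove_unwanted_chars_py remove_unwanted_chars_py remove_unwanted_chars_py_alt
  rw [pv_key]
  rfl
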